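-- pv_equiv track=rewrite | github.com/Alessandro727/DreamAnalyzer | emotions.py | takeLastMan
-- ===== SOURCE A (Python) =====
-- def takeLastMan(lista):
-- 	split_list = []
-- 	for i in range(len(lista)):
-- 		if 'he ' in lista[i].lower() or 'his ' in lista[i].lower() or 'him ' in lista[i].lower():
-- 			split_list = lista[:i]
-- 	if split_list != []:
-- 		for k in reversed(split_list):
-- 			if '1M' in k or '1I' in k:
-- 				lista.remove(lista[i])
-- 				return k
-- 	return '1MSA'
-- ===== SOURCE B (Python) =====
-- def takeLastMan(lista):
--     # One backward scan: once the last pronoun-bearing element is passed,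
--     # return the first element (from the back) containing '1M' or '1I'.
--     seen = False
--     for k in reversed(lista):
--         if seen:
--             if '1M' in k or '1I' in k:
--                 return k
--         else:
--             t = k.lower()
--             if 'he ' in t or 'his ' in t or 'him ' in t:
--                 seen = True
--     return '1MSA'
-- ===== Notes on version B (the rewrite author's own statement) =====
-- stated objective: alternative
-- what changed: replaces the forward loop that re-slices lista[:i] at every pronoun hit by one backward scan with a 'seen pronoun' flag, so no prefix list is ever built; B is pure, it does not reproduce A's accidental in-place lista.remove (return values are identical)
import Mathlib
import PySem

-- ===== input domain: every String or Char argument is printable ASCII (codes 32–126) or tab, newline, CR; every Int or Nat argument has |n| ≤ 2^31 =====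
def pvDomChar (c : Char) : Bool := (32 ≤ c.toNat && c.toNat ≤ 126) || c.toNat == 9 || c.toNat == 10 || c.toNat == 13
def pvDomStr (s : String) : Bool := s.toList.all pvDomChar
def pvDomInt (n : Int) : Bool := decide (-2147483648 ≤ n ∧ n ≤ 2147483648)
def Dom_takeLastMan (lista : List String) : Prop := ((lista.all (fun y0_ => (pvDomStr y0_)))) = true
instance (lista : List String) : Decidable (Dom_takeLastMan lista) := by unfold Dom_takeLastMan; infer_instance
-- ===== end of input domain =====

-- B replaces A's forward loop that re-slices lista[:i] on every pronoun hit by one backward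
-- scan with a 'seen pronoun' flag. Equivalence is about the RETURN value only:
-- A also mutates lista in place (an accidental lista.remove); B is pure.

-- ===== PORT A =====
-- shared literal conditions of both Pythons
def hasPron (s : String) : Bool :=
  PySem.Str.isIn "he " (PySem.Str.lower s) || PySem.Str.isIn "his " (PySem.Str.lower s) ||
    PySem.Str.isIn "him " (PySem.Str.lower s)

def hasMan (k : String) : Bool := PySem.Str.isIn "1M" k || PySem.Str.isIn "1I" k

-- lista[i] with 0 ≤ i < len(lista): getD is exact here
def takeLastMan (lista : List String) : String :=
  let split_list := (List.range lista.length).foldl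
    (fun acc i => if hasPron (lista.getD i "") then lista.take i else acc) []
  if split_list ≠ [] then
    match split_list.reverse.find? hasMan with
    | some k => k
    | none => "1MSA"
  else "1MSA"

-- ===== PORT B =====
-- the backward 'for k in reversed(lista)' loop of Source B = structural recursion over lista.reverse, carrying 'seen'
def altLoop : Bool → List String → String
  | _, [] => "1MSA"
  | true, k :: rest => if hasMan k then k else altLoop true rest
  | false, k :: rest => if hasPron k then altLoop true rest else altLoop false rest

def takeLastMan_alt (lista : List String) : String := altLoop false lista.reverse

-- ===== PRECONDITION & SPEC =====
def Spec_takeLastMan (lista : List String) (out : String) : Prop := out = takeLastMan_alt lista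
instance (lista : List String) (out : String) : Decidable (Spec_takeLastMan lista out) := by unfold Spec_takeLastMan; infer_instance

-- ===== CLAIM (what is proved, stated in full; the proofs are below) =====
def Claim_equal_takeLastMan : Prop := ∀ (lista : List String), Dom_takeLastMan lista → Spec_takeLastMan lista (takeLastMan lista)

-- ===== LEMMAS AND PROOFS =====

theorem altLoop_true (rest : List String) :
    altLoop true rest = (rest.find? hasMan).getD "1MSA" := by
  induction rest with
  | nil => rfl
  | cons k rest ih =>
    by_cases h : hasMan k = true <;> simp [altLoop, List.find?, h, ih]

-- collapse A's 'if split_list != []' guard: find? on [] is none anyway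
theorem takeLastMan_eq (lista : List String) :
    takeLastMan lista =
      (((List.range lista.length).foldl
          (fun acc i => if hasPron (lista.getD i "") then lista.take i else acc)
          []).reverse.find? hasMan).getD "1MSA" := by
  unfold takeLastMan
  set s := (List.range lista.length).foldl
      (fun acc i => if hasPron (lista.getD i "") then lista.take i else acc) [] with hs
  by_cases h : s = []
  · simp [h]
  · simp only [h, if_pos, ne_eq, not_false_iff]
    cases hf : s.reverse.find? hasMan <;> simp

theorem main_eq (lista : List String) :
    takeLastMan lista = altLoop false lista.reverse := by
  induction lista using List.reverseRecOn with
  | nil => rfl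
  | append_singleton ys x ih =>
    rw [takeLastMan_eq] at ih ⊢
    have hlen : (ys ++ [x]).length = ys.length + 1 := by simp
    rw [hlen, List.range_succ, List.foldl_append]
    have hx : (ys ++ [x]).getD ys.length "" = x := by
      simp [List.getD]
    have hcongr : (List.range ys.length).foldl
        (fun acc i => if hasPron ((ys ++ [x]).getD i "") then (ys ++ [x]).take i else acc) []
        = (List.range ys.length).foldl
        (fun acc i => if hasPron (ys.getD i "") then ys.take i else acc) [] := by
      apply PySem.List.foldl_congr_mem
      intro acc i hi
      have hi' : i < ys.length := List.mem_range.mp hi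
      have h1 : (ys ++ [x]).getD i "" = ys.getD i "" := by
        simp [List.getD, List.getElem?_append_left hi']
      have h2 : (ys ++ [x]).take i = ys.take i :=
        List.take_append_of_le_length (Nat.le_of_lt hi')
      rw [h1, h2]
    rw [List.foldl_cons, List.foldl_nil, hcongr, hx]
    by_cases hp : hasPron x = true
    · have htake : (ys ++ [x]).take ys.length = ys := by simp
      simp only [hp, if_pos, htake]
      rw [List.reverse_append]
      simp only [List.reverse_singleton, List.singleton_append, altLoop, hp, if_pos]
      rw [altLoop_true]
    · rw [Bool.not_eq_true] at hp
      rw [List.reverse_append, List.reverse_singleton, List.singleton_append]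
      simp only [altLoop, hp, Bool.false_eq_true, if_false]
      simpa [hp] using ih

-- ===== VERDICT (by name: the statement is the Claim_ definition above) =====
theorem takeLastMan_spec : Claim_equal_takeLastMan := by
  intro lista _
  unfold Spec_takeLastMan takeLastMan_alt
  exact main_eq lista
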